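-- pv_equiv track=rewrite | github.com/Ishitagangal/LeetCode-Practice | MS/Medium/14. MIn time to make rope colorful.py | minCost2pointer
-- ===== SOURCE A (Python) =====
-- from typing import List
--
-- def minCost2pointer(colors: str, neededTime: List[int]) -> int:
--     total_time = 0
--     left, right = 0, 0
--     while left <len(neededTime) and right <len(neededTime):
--         curr_total = 0
--         curr_max = 0
--         while right < len(neededTime) and colors[left] == colors[right]:
--             curr_total += neededTime[right]
--             curr_max = max(curr_max, neededTime[right])
--             right += 1
--         total_time += curr_total - curr_max # keep the max val, remove the others
--         left = right
--     return total_time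
-- ===== SOURCE B (Python) =====
-- from typing import List
--
-- def minCost2pointer(colors: str, neededTime: List[int]) -> int:
--     total = 0
--     curr_max = 0
--     for i in range(len(neededTime)):
--         if i > 0 and colors[i] != colors[i - 1]:
--             curr_max = 0
--         total += min(curr_max, neededTime[i])
--         curr_max = max(curr_max, neededTime[i])
--     return total
-- ===== Notes on version B (the rewrite author's own statement) =====
-- stated objective: idiomatic
-- what changed: Replaces A's two-pointer nested while loops (grouping each run, summing it and subtracting its max) by the standard single flat greedy pass that adds min(curr_max, neededTime[i]) per element and resets curr_max at color boundaries; Pre_ excludes only inputs where A raises IndexError (colors shorter than neededTime).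
import Mathlib
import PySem

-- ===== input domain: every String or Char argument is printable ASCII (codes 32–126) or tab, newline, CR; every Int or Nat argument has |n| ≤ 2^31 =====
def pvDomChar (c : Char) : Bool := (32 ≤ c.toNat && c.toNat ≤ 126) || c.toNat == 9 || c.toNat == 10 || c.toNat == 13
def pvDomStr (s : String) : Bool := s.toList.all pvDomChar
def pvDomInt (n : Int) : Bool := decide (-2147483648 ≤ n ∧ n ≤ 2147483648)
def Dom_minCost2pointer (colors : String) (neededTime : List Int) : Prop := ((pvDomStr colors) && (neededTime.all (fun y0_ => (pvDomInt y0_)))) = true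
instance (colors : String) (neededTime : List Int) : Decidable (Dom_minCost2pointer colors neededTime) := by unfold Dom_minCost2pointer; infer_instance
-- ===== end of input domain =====

-- B replaces A's two-pointer nested while loops by the standard single flat greedy pass
-- (add min(curr_max, neededTime[i]) per element, reset curr_max at color boundaries); same O(n) cost, idiomatic.


-- ===== PORT A =====
-- inner while loop: while right < len(neededTime) and colors[left] == colors[right]:
--   curr_total += neededTime[right]; curr_max = max(curr_max, neededTime[right]); right += 1
-- (string/list indexing via getD; exact inside Pre_, where every index Python touches is in range)
def pvInnerA (cs : List Char) (nt : List Int) (left : Nat) (right : Nat) (ct cm : Int) :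
    Int × Int × Nat :=
  if _h : right < nt.length ∧ cs.getD left ' ' = cs.getD right ' ' then
    pvInnerA cs nt left (right + 1) (ct + nt.getD right 0) (max cm (nt.getD right 0))
  else (ct, cm, right)
termination_by nt.length - right
decreasing_by omega

-- outer while loop: while left < len and right < len; the fuel only makes the recursion
-- structural — fuel = len+1 is always enough since each iteration advances right
def pvOuterA (cs : List Char) (nt : List Int) : Nat → Int → Nat → Nat → Int
  | 0, total, _, _ => total
  | fuel + 1, total, left, right =>
    if left < nt.length ∧ right < nt.length then
      let r := pvInnerA cs nt left right 0 0
      pvOuterA cs nt fuel (total + r.1 - r.2.1) r.2.2 r.2.2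
    else total

def minCost2pointer (colors : String) (neededTime : List Int) : Int :=
  pvOuterA colors.toList neededTime (neededTime.length + 1) 0 0 0

-- ===== PORT B =====
-- loop body of Source B: for i in range(len(neededTime)):
--   if i > 0 and colors[i] != colors[i-1]: curr_max = 0
--   total += min(curr_max, neededTime[i]); curr_max = max(curr_max, neededTime[i])
def pvStepB (cs : List Char) (nt : List Int) (st : Int × Int) (i : Int) : Int × Int :=
  let cm := if 0 < i ∧ cs.getD i.toNat ' ' ≠ cs.getD (i.toNat - 1) ' ' then 0 else st.2
  (st.1 + min cm (nt.getD i.toNat 0), max cm (nt.getD i.toNat 0))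

def minCost2pointer_alt (colors : String) (neededTime : List Int) : Int :=
  ((PySem.List.pyRange 0 (neededTime.length : Int) 1).foldl
    (pvStepB colors.toList neededTime) (0, 0)).1

-- ===== PRECONDITION & SPEC =====
-- Pre_ excludes exactly the inputs where Python A raises IndexError:
-- colors shorter than neededTime (A indexes colors at every position < len(neededTime)).
def Pre_minCost2pointer (colors : String) (neededTime : List Int) : Prop :=
  neededTime.length ≤ colors.length
instance (colors : String) (neededTime : List Int) : Decidable (Pre_minCost2pointer colors neededTime) := by unfold Pre_minCost2pointer; infer_instance

def pvWitness_minCost2pointer : String × List Int := ("aab", [1, 2, 3])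

def Spec_minCost2pointer (colors : String) (neededTime : List Int) (out : Int) : Prop := out = minCost2pointer_alt colors neededTime
instance (colors : String) (neededTime : List Int) (out : Int) : Decidable (Spec_minCost2pointer colors neededTime out) := by unfold Spec_minCost2pointer; infer_instance

-- ===== CLAIM (what is proved, stated in full; the proofs are below) =====
def Claim_equal_minCost2pointer : Prop := ∀ (colors : String) (neededTime : List Int), Dom_minCost2pointer colors neededTime → Pre_minCost2pointer colors neededTime → Spec_minCost2pointer colors neededTime (minCost2pointer colors neededTime)

-- ===== LEMMAS AND PROOFS =====

-- structural version of B's fold, recursing on the index (proof helper)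
def pvBgo (cs : List Char) (nt : List Int) (j : Nat) (tot cm : Int) : Int :=
  if j < nt.length then
    let cm' := if 0 < j ∧ cs.getD j ' ' ≠ cs.getD (j - 1) ' ' then 0 else cm
    pvBgo cs nt (j + 1) (tot + min cm' (nt.getD j 0)) (max cm' (nt.getD j 0))
  else tot
termination_by nt.length - j
decreasing_by omega

lemma pvB_fold_eq (cs : List Char) (nt : List Int) :
    ∀ k j tot cm, nt.length - j ≤ k →
    ((PySem.List.pyRange (j : Int) (nt.length : Int) 1).foldl (pvStepB cs nt) (tot, cm)).1
      = pvBgo cs nt j tot cm := by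
  intro k
  induction k with
  | zero =>
    intro j tot cm hk
    have hj : (nt.length : Int) ≤ (j : Int) := by exact_mod_cast Nat.le_of_sub_eq_zero (Nat.le_zero.mp hk)
    rw [PySem.List.pyRange_one_eq_nil hj]
    rw [pvBgo, if_neg (by omega)]
    simp only [List.foldl_nil]
  | succ k ih =>
    intro j tot cm hk
    by_cases hj : j < nt.length
    · rw [PySem.List.pyRange_one_cons (by exact_mod_cast hj)]
      rw [List.foldl_cons]
      rw [pvBgo, if_pos hj]
      have h1 : ((j : Int) + 1) = ((j + 1 : Nat) : Int) := by push_cast; ring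
      rw [h1]
      unfold pvStepB
      simp only [Int.toNat_natCast]
      have hpos : (0 < (j : Int)) ↔ (0 < j) := by exact_mod_cast Iff.rfl
      by_cases hc : 0 < j ∧ cs.getD j ' ' ≠ cs.getD (j - 1) ' '
      · rw [if_pos (by exact ⟨by exact_mod_cast hc.1, hc.2⟩), if_pos hc]
        exact ih (j+1) _ _ (by omega)
      · rw [if_neg (by rintro ⟨h1, h2⟩; exact hc ⟨by exact_mod_cast h1, h2⟩), if_neg hc]
        exact ih (j+1) _ _ (by omega)
    · have hj' : (nt.length : Int) ≤ (j : Int) := by exact_mod_cast Nat.le_of_not_lt hj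
      rw [PySem.List.pyRange_one_eq_nil hj']
      rw [pvBgo, if_neg hj]
      simp only [List.foldl_nil]

-- main invariant: mid-run at index j (run started at l, colors[l] == colors[j-1]), A's
-- remaining computation (finish the inner loop from j with accumulators ct, cm, then keep
-- looping) equals B's structural loop from j with state (totA + ct - cm, cm), provided 0 ≤ cm.
lemma pvRun (cs : List Char) (nt : List Int) :
    ∀ k j l ct cm totA fuel, 1 ≤ j → j ≤ nt.length → nt.length - j ≤ k → l < j →
      0 ≤ cm →
      nt.length + 1 - j ≤ fuel →
      cs.getD (j - 1) ' ' = cs.getD l ' ' →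
      (let r := pvInnerA cs nt l j ct cm
       pvOuterA cs nt fuel (totA + r.1 - r.2.1) r.2.2 r.2.2)
        = pvBgo cs nt j (totA + ct - cm) cm := by
  intro k
  induction k with
  | zero =>
    intro j l ct cm totA fuel h1 h2 hk hl hcm hf hc
    have hj : j = nt.length := by omega
    subst hj
    rw [pvInnerA, dif_neg (by omega)]
    simp only
    obtain ⟨fuel, rfl⟩ : ∃ f, fuel = f + 1 := ⟨fuel - 1, by omega⟩
    rw [pvOuterA, if_neg (by omega)]
    rw [pvBgo, if_neg (by omega)]
  | succ k ih =>
    intro j l ct cm totA fuel h1 h2 hk hl hcm hf hc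
    by_cases hj : j < nt.length
    · by_cases hcj : cs.getD l ' ' = cs.getD j ' '
      · -- run continues at j
        rw [pvInnerA, dif_pos ⟨hj, hcj⟩]
        have := ih (j+1) l (ct + nt.getD j 0) (max cm (nt.getD j 0)) totA fuel
          (by omega) (by omega) (by omega) (by omega) (le_trans hcm (le_max_left _ _))
          (by omega) (by simpa using hcj.symm)
        simp only at this
        rw [this]
        conv_rhs => rw [pvBgo]
        rw [if_pos hj]
        have hne : ¬ (0 < j ∧ cs.getD j ' ' ≠ cs.getD (j - 1) ' ') := by
          rintro ⟨_, hne⟩; exact hne (hcj.symm.trans hc.symm)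
        simp only [if_neg hne]
        congr 1
        have : min cm (nt.getD j 0) + max cm (nt.getD j 0) = cm + nt.getD j 0 :=
          min_add_max cm (nt.getD j 0)
        omega
      · -- run break at j: A closes this run and starts a new one at j
        rw [pvInnerA, dif_neg (by rintro ⟨_, h⟩; exact hcj h)]
        simp only
        obtain ⟨fuel, rfl⟩ : ∃ f, fuel = f + 1 := ⟨fuel - 1, by omega⟩
        rw [pvOuterA, if_pos ⟨by omega, hj⟩]
        simp only
        rw [pvInnerA, dif_pos ⟨hj, rfl⟩]
        have := ih (j+1) j (0 + nt.getD j 0) (max 0 (nt.getD j 0))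
          (totA + ct - cm) fuel (by omega) (by omega) (by omega) (by omega)
          (le_max_left _ _) (by omega) (by simp)
        simp only at this
        rw [this]
        conv_rhs => rw [pvBgo]
        rw [if_pos hj]
        have hyes : (0 < j ∧ cs.getD j ' ' ≠ cs.getD (j - 1) ' ') :=
          ⟨by omega, fun h => hcj (hc.symm.trans h.symm)⟩
        simp only [if_pos hyes]
        congr 1
        have : min 0 (nt.getD j 0) + max 0 (nt.getD j 0) = 0 + nt.getD j 0 :=
          min_add_max 0 (nt.getD j 0)
        omega
    · have hj' : j = nt.length := by omega
      subst hj'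
      rw [pvInnerA, dif_neg (by omega)]
      simp only
      obtain ⟨fuel, rfl⟩ : ∃ f, fuel = f + 1 := ⟨fuel - 1, by omega⟩
      rw [pvOuterA, if_neg (by omega)]
      rw [pvBgo, if_neg (by omega)]

theorem pv_equal : ∀ (colors : String) (neededTime : List Int),
    minCost2pointer colors neededTime = minCost2pointer_alt colors neededTime := by
  intro colors nt
  cases nt with
  | nil =>
    unfold minCost2pointer minCost2pointer_alt
    rw [pvOuterA, if_neg (by simp)]
    rw [PySem.List.pyRange_one_eq_nil (by simp)]
    simp
  | cons t0 rest =>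
    unfold minCost2pointer minCost2pointer_alt
    have hn : 0 < (t0 :: rest).length := by simp
    rw [pvOuterA, if_pos ⟨hn, hn⟩]
    dsimp only
    rw [pvInnerA, dif_pos ⟨hn, rfl⟩]
    have hrun := pvRun colors.toList (t0 :: rest) ((t0 :: rest).length - 1) 1 0
      (0 + (t0 :: rest).getD 0 0) (max 0 ((t0 :: rest).getD 0 0)) 0 (t0 :: rest).length
      (by omega) (by simp) (by omega) (by omega) (le_max_left _ _) (by omega) (by simp)
    simp only at hrun
    rw [hrun]
    have hfold := pvB_fold_eq colors.toList (t0 :: rest) (t0 :: rest).length 0 0 0 (by omega)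
    rw [show ((0 : Nat) : Int) = (0 : Int) by simp] at hfold
    rw [hfold]
    conv_rhs => rw [pvBgo]
    rw [if_pos hn]
    have hne : ¬ ((0 : Nat) < 0 ∧ colors.toList.getD 0 ' ' ≠ colors.toList.getD (0 - 1) ' ') := by
      rintro ⟨h, _⟩; omega
    simp only [if_neg hne, Nat.zero_add]
    congr 1
    have : min 0 ((t0 :: rest).getD 0 0) + max 0 ((t0 :: rest).getD 0 0)
        = 0 + (t0 :: rest).getD 0 0 := min_add_max 0 ((t0 :: rest).getD 0 0)
    omega

-- ===== VERDICT (by name: the statement is the Claim_ definition above) =====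
theorem minCost2pointer_spec : Claim_equal_minCost2pointer := by
  intro colors neededTime _ _
  exact pv_equal colors neededTime
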